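-- pv_equiv track=rewrite | github.com/openenglishbible/USFM-Tools | transform/support/contextRenderer.py | smallCapText
-- ===== SOURCE A (Python) =====
-- def smallCapText(s):
--      i = 0
--      while i < len(s):
--          if i < 50:  #we are early, look for comma
--              if s[i] == ',' or s[i] == ';' or s[i] == '(' or s[i:i+3] == 'and':
--                  return '{\sc ' + s[:i+1] + '}' + s[i+1:]
--          else: # look for space
--              if s[i] == ' ':
--                  return '{\sc ' + s[:i] + '}' + s[i:]
--          i = i + 1
--      return '{\sc ' + s + '}'
-- ===== SOURCE B (Python) =====
-- def smallCapText(s):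
--     cands = [p for p in (s.find(','), s.find(';'), s.find('('), s.find('and')) if 0 <= p < 50]
--     if cands:
--         p = min(cands)
--         return '{\sc ' + s[:p+1] + '}' + s[p+1:]
--     q = s.find(' ', 50)
--     if q != -1:
--         return '{\sc ' + s[:q] + '}' + s[q:]
--     return '{\sc ' + s + '}'
-- ===== Notes on version B (the rewrite author's own statement) =====
-- stated objective: faster
-- what changed: Replaced the index-by-index character scan with direct string searches: the split point is the minimum of the four delimiter find() positions below 50, else the first space found by a single find starting at index 50.
import Mathlib
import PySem

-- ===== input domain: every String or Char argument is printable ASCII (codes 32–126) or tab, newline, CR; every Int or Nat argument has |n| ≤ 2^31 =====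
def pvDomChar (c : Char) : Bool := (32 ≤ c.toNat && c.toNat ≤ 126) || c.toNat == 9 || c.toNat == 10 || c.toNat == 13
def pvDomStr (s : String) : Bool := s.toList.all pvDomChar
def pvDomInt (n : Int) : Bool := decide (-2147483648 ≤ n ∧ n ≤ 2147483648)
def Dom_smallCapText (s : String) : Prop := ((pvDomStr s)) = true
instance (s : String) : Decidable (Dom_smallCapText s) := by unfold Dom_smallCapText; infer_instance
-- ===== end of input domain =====

-- B replaces A's per-character scan with direct substring searches: the split point is the minimum of the four delimiter find() positions below 50, else the first space found by a single find starting at index 50; objective: faster (C-level find vs per-character Python loop).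
-- ===== PORT A =====
def smallCapTextLoop (l : List Char) (i : Nat) : List Char :=
  if i < l.length then
    if i < 50 then
      if PySem.List.pyGetD l (i : Int) ' ' = ',' ∨ PySem.List.pyGetD l (i : Int) ' ' = ';' ∨
         PySem.List.pyGetD l (i : Int) ' ' = '(' ∨
         PySem.List.slice l (some (i : Int)) (some ((i : Int) + 3)) = "and".toList then
        "{\\sc ".toList ++ PySem.List.slice l none (some ((i : Int) + 1)) ++ "}".toList ++
          PySem.List.slice l (some ((i : Int) + 1)) none
      else smallCapTextLoop l (i + 1)
    else
      if PySem.List.pyGetD l (i : Int) ' ' = ' ' then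
        "{\\sc ".toList ++ PySem.List.slice l none (some (i : Int)) ++ "}".toList ++
          PySem.List.slice l (some (i : Int)) none
      else smallCapTextLoop l (i + 1)
  else "{\\sc ".toList ++ l ++ "}".toList
termination_by l.length - i

def smallCapText (s : String) : String := String.ofList (smallCapTextLoop s.toList 0)

-- ===== PORT B =====
def smallCapText_alt (s : String) : String :=
  let l := s.toList
  let cands := [PySem.Chars.find l [','], PySem.Chars.find l [';'], PySem.Chars.find l ['('],
                PySem.Chars.find l "and".toList].filter (fun p => decide (0 ≤ p ∧ p < 50))
  match PySem.List.min? cands id with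
  | some p =>
      String.ofList ("{\\sc ".toList ++ PySem.List.slice l none (some (p + 1)) ++ "}".toList ++
        PySem.List.slice l (some (p + 1)) none)
  | none =>
      let q := PySem.Chars.findFrom l [' '] 50
      if q ≠ -1 then
        String.ofList ("{\\sc ".toList ++ PySem.List.slice l none (some q) ++ "}".toList ++
          PySem.List.slice l (some q) none)
      else String.ofList ("{\\sc ".toList ++ l ++ "}".toList)

-- ===== PRECONDITION & SPEC =====
def Spec_smallCapText (s : String) (out : String) : Prop := out = smallCapText_alt s
instance (s : String) (out : String) : Decidable (Spec_smallCapText s out) := by unfold Spec_smallCapText; infer_instance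

-- ===== CLAIM (what is proved, stated in full; the proofs are below) =====
def Claim_equal_smallCapText : Prop := ∀ (s : String), Dom_smallCapText s → Spec_smallCapText s (smallCapText s)

-- ===== LEMMAS AND PROOFS =====

def delimAt (l : List Char) (j : Nat) : Prop :=
  [','] <+: l.drop j ∨ [';'] <+: l.drop j ∨ ['('] <+: l.drop j ∨ "and".toList <+: l.drop j

def hitAt (l : List Char) (j : Nat) : Prop :=
  if j < 50 then delimAt l j else [' '] <+: l.drop j

lemma single_prefix_drop {l : List Char} {j : Nat} (c : Char) (h : j < l.length) :
    ([c] <+: l.drop j) ↔ PySem.List.pyGetD l (j : Int) ' ' = c := by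
  rw [PySem.List.pyGetD_natCast, List.getD_eq_getElem l ' ' h,
    List.drop_eq_getElem_cons h, List.cons_prefix_cons]
  simp [eq_comm]

lemma and_slice_iff {l : List Char} {j : Nat} :
    PySem.List.slice l (some (j : Int)) (some ((j : Int) + 3)) = "and".toList ↔
      "and".toList <+: l.drop j := by
  rw [show ((j : Int) + 3) = ((j : Int) + ((3 : Nat) : Int)) by norm_num,
    PySem.List.slice_natCast_add, List.prefix_iff_eq_take]
  constructor <;> intro hh <;> simp_all

lemma delimAt_lt_length {l : List Char} {j : Nat} (h : delimAt l j) : j < l.length := by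
  by_contra hc
  push_neg at hc
  unfold delimAt at h
  rw [List.drop_eq_nil_of_le hc] at h
  rcases h with h|h|h|h <;> simp [List.prefix_nil] at h

lemma delim_cond_iff {l : List Char} {i : Nat} (h : i < l.length) :
    (PySem.List.pyGetD l (i : Int) ' ' = ',' ∨ PySem.List.pyGetD l (i : Int) ' ' = ';' ∨
     PySem.List.pyGetD l (i : Int) ' ' = '(' ∨
     PySem.List.slice l (some (i : Int)) (some ((i : Int) + 3)) = "and".toList) ↔ delimAt l i := by
  unfold delimAt
  rw [single_prefix_drop ',' h, single_prefix_drop ';' h, single_prefix_drop '(' h, and_slice_iff]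

lemma loop_ge (l : List Char) (i : Nat) (h : l.length ≤ i) :
    smallCapTextLoop l i = "{\\sc ".toList ++ l ++ "}".toList := by
  rw [smallCapTextLoop, if_neg (by omega)]

lemma loop_step (l : List Char) (i : Nat) (hn : ¬ hitAt l i) :
    smallCapTextLoop l i = smallCapTextLoop l (i + 1) := by
  by_cases hi : i < l.length
  · unfold hitAt at hn
    by_cases h50 : i < 50
    · rw [smallCapTextLoop, if_pos hi, if_pos h50, if_neg]
      rw [delim_cond_iff hi]
      simpa [h50] using hn
    · rw [smallCapTextLoop, if_pos hi, if_neg h50, if_neg]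
      rw [← single_prefix_drop ' ' hi]
      simpa [h50] using hn
  · rw [loop_ge l i (by omega), loop_ge l (i+1) (by omega)]

lemma loop_skip (l : List Char) (i m : Nat) (him : i ≤ m)
    (hno : ∀ j, i ≤ j → j < m → ¬ hitAt l j) :
    smallCapTextLoop l i = smallCapTextLoop l m := by
  induction m, him using Nat.le_induction with
  | base => rfl
  | succ m hm ih =>
      rw [ih (fun j hj hj2 => hno j hj (by omega)), loop_step l m (hno m hm (by omega))]

lemma loop_hit_delim (l : List Char) (m : Nat) (h50 : m < 50) (hd : delimAt l m) :
    smallCapTextLoop l m =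
      "{\\sc ".toList ++ PySem.List.slice l none (some ((m : Int) + 1)) ++ "}".toList ++
        PySem.List.slice l (some ((m : Int) + 1)) none := by
  have hm : m < l.length := delimAt_lt_length hd
  rw [smallCapTextLoop, if_pos hm, if_pos h50, if_pos ((delim_cond_iff hm).mpr hd)]

lemma loop_hit_space (l : List Char) (m : Nat) (h50 : ¬ m < 50) (hm : m < l.length)
    (hs : [' '] <+: l.drop m) :
    smallCapTextLoop l m =
      "{\\sc ".toList ++ PySem.List.slice l none (some (m : Int)) ++ "}".toList ++
        PySem.List.slice l (some (m : Int)) none := by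
  rw [smallCapTextLoop, if_pos hm, if_neg h50, if_pos ((single_prefix_drop ' ' hm).mp hs)]

lemma find_le_of_prefix_drop {l pat : List Char} {j : Nat} (h : pat <+: l.drop j) :
    0 ≤ PySem.Chars.find l pat ∧ PySem.Chars.find l pat ≤ (j : Int) := by
  have h0 : 0 ≤ PySem.Chars.find l pat := by
    rw [PySem.Chars.find_nonneg_iff, ← PySem.Chars.isIn_iff_infix,
      ← PySem.Chars.exists_prefix_drop_iff_isIn]
    exact ⟨j, h⟩
  refine ⟨h0, ?_⟩
  by_contra hc
  push_neg at hc
  exact (PySem.Chars.find_spec h0).2 j (by omega) h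

lemma findFrom_short (l : List Char) (h : l.length < 50) :
    PySem.Chars.findFrom l [' '] 50 = -1 := by
  simp only [PySem.Chars.findFrom]
  norm_num
  omega

-- ===== VERDICT (by name: the statement is the Claim_ definition above) =====
theorem smallCapText_spec : Claim_equal_smallCapText := by
  intro s _
  unfold Spec_smallCapText
  unfold smallCapText smallCapText_alt
  set l := s.toList with hl
  dsimp only
  cases hmin : PySem.List.min? ([PySem.Chars.find l [','], PySem.Chars.find l [';'],
      PySem.Chars.find l ['('], PySem.Chars.find l "and".toList].filter
      (fun p => decide (0 ≤ p ∧ p < 50))) id with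
  | some p =>
      have hpmem := PySem.List.min?_mem hmin
      have hpmin := PySem.List.min?_isMin hmin
      rw [List.mem_filter] at hpmem
      obtain ⟨hpl, hpred⟩ := hpmem
      simp only [decide_eq_true_eq] at hpred
      obtain ⟨hp0, hp50⟩ := hpred
      set m := p.toNat with hm
      have hpm : p = (m : Int) := (Int.toNat_of_nonneg hp0).symm
      have hdelim : delimAt l m := by
        unfold delimAt
        simp only [List.mem_cons, List.not_mem_nil, or_false] at hpl
        rcases hpl with h|h|h|h
        · exact Or.inl (by rw [hm, h]; exact (PySem.Chars.find_spec (h ▸ hp0)).1)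
        · exact Or.inr (Or.inl (by rw [hm, h]; exact (PySem.Chars.find_spec (h ▸ hp0)).1))
        · exact Or.inr (Or.inr (Or.inl (by rw [hm, h]; exact (PySem.Chars.find_spec (h ▸ hp0)).1)))
        · exact Or.inr (Or.inr (Or.inr (by rw [hm, h]; exact (PySem.Chars.find_spec (h ▸ hp0)).1)))
      have hnohit : ∀ j, j < m → ¬ hitAt l j := by
        intro j hj hhit
        have hj50 : j < 50 := by omega
        have key : ∀ pat : List Char, pat <+: l.drop j →
            PySem.Chars.find l pat ∈ [PySem.Chars.find l [','], PySem.Chars.find l [';'],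
              PySem.Chars.find l ['('], PySem.Chars.find l "and".toList] → False := by
          intro pat hpre hmem
          obtain ⟨h0, hle⟩ := find_le_of_prefix_drop hpre
          have hcand : PySem.Chars.find l pat ∈ ([PySem.Chars.find l [','], PySem.Chars.find l [';'],
              PySem.Chars.find l ['('], PySem.Chars.find l "and".toList].filter
              (fun p => decide (0 ≤ p ∧ p < 50))) :=
            List.mem_filter.mpr ⟨hmem, by simp only [decide_eq_true_eq]; omega⟩
          have := hpmin _ hcand
          simp only [id] at this
          omega
        unfold hitAt at hhit
        rw [if_pos hj50] at hhit
        rcases hhit with h|h|h|h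
        · exact key _ h (by simp)
        · exact key _ h (by simp)
        · exact key _ h (by simp)
        · exact key _ h (by simp)
      rw [loop_skip l 0 m (by omega) (fun j _ hj => hnohit j hj),
        loop_hit_delim l m (by omega) hdelim, hpm]
  | none =>
      rw [PySem.List.min?_eq_none_iff] at hmin
      have hnodelim : ∀ j : Nat, j < 50 → ¬ delimAt l j := by
        intro j hj50 hd
        have key : ∀ pat : List Char, pat <+: l.drop j →
            PySem.Chars.find l pat ∈ [PySem.Chars.find l [','], PySem.Chars.find l [';'],
              PySem.Chars.find l ['('], PySem.Chars.find l "and".toList] → False := by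
          intro pat hpre hmem
          obtain ⟨h0, hle⟩ := find_le_of_prefix_drop hpre
          have hcand : PySem.Chars.find l pat ∈ ([PySem.Chars.find l [','], PySem.Chars.find l [';'],
              PySem.Chars.find l ['('], PySem.Chars.find l "and".toList].filter
              (fun p => decide (0 ≤ p ∧ p < 50))) :=
            List.mem_filter.mpr ⟨hmem, by simp only [decide_eq_true_eq]; omega⟩
          rw [hmin] at hcand
          simp at hcand
        unfold delimAt at hd
        rcases hd with h|h|h|h
        · exact key _ h (by simp)
        · exact key _ h (by simp)
        · exact key _ h (by simp)
        · exact key _ h (by simp)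
      by_cases hq : PySem.Chars.findFrom l [' '] 50 = -1
      · rw [if_neg (by simp [hq])]
        have hnone : ∀ j, ¬ hitAt l j := by
          intro j hhit
          unfold hitAt at hhit
          by_cases hj50 : j < 50
          · rw [if_pos hj50] at hhit; exact hnodelim j hj50 hhit
          · rw [if_neg hj50] at hhit
            by_cases hlen : l.length < 50
            · rw [List.drop_eq_nil_of_le (by omega)] at hhit
              simp [List.prefix_nil] at hhit
            · have h50len : 50 ≤ l.length := by omega
              rw [show (50:Int) = ((50:Nat):Int) by norm_num,
                PySem.Chars.findFrom_natCast l [' '] 50 h50len] at hq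
              have hfind : PySem.Chars.find (l.drop 50) [' '] = -1 := by
                by_cases hf : PySem.Chars.find (l.drop 50) [' '] = -1
                · exact hf
                · exfalso
                  rw [if_neg hf] at hq
                  have := PySem.Chars.neg_one_le_find (l.drop 50) [' ']
                  omega
              rw [PySem.Chars.find_eq_neg_one_iff] at hfind
              apply hfind
              rw [← PySem.Chars.isIn_iff_infix, ← PySem.Chars.exists_prefix_drop_iff_isIn]
              refine ⟨j - 50, ?_⟩
              rw [List.drop_drop, show 50 + (j - 50) = j from by omega]
              exact hhit
        rw [loop_skip l 0 l.length (by omega) (fun j _ _ => hnone j), loop_ge l l.length le_rfl]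
      · rw [if_pos (by simpa using hq)]
        have hlen : 50 ≤ l.length := by
          by_contra hc
          push_neg at hc
          exact hq (findFrom_short l (by omega))
        rw [show (50:Int) = ((50:Nat):Int) by norm_num,
          PySem.Chars.findFrom_natCast l [' '] 50 hlen] at hq ⊢
        set r := PySem.Chars.find (l.drop 50) [' '] with hr
        have hrne : r ≠ -1 := by
          intro h
          exact hq (by rw [if_pos h])
        rw [if_neg hrne] at hq ⊢
        have hr0 : 0 ≤ r := by
          have := PySem.Chars.neg_one_le_find (l.drop 50) [' ']
          omega
        have hspec := PySem.Chars.find_spec (s := l.drop 50) (sub := [' ']) hr0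
        set m := 50 + r.toNat with hm
        have hrm : ((50:Nat):Int) + r = (m : Int) := by omega
        have hpre : [' '] <+: l.drop m := by
          have h1 := hspec.1
          rwa [← hr, List.drop_drop] at h1
        have hmlen : m < l.length := by
          by_contra hc
          push_neg at hc
          rw [List.drop_eq_nil_of_le hc] at hpre
          simp [List.prefix_nil] at hpre
        have hno : ∀ j, j < m → ¬ hitAt l j := by
          intro j hj hhit
          unfold hitAt at hhit
          by_cases hj50 : j < 50
          · rw [if_pos hj50] at hhit; exact hnodelim j hj50 hhit
          · rw [if_neg hj50] at hhit
            apply hspec.2 (j - 50) (by omega)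
            rw [List.drop_drop, show 50 + (j - 50) = j from by omega]
            exact hhit
        rw [loop_skip l 0 m (by omega) (fun j _ hj => hno j hj),
          loop_hit_space l m (by omega) hmlen hpre, hrm]
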